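-- pv_equiv track=rewrite | github.com/Hal-ws/--Algorithm-Problem-Solving | 17281.py | getans
-- ===== SOURCE A (Python) =====
-- def getans(case, hitterresult, N):
--     inning = 0
--     order = 0 ## 타순: case[0]~case[8] 0번타순~8번타순의 선수들이 해당 이닝에 내는 점수
--     score = 0
--     while inning < N:
--         outcnt = 0
--         base = [0, 0, 0]  ## 1루, 2루, 3루
--         while outcnt < 3:
--             if hitterresult[inning][case[order]] == 0:
--                 outcnt += 1
--             elif hitterresult[inning][case[order]] == 1:
--                 score += base[2]
--                 base[1], base[2] = base[0], base[1]
--                 base[0] = 1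
--             elif hitterresult[inning][case[order]] == 2:
--                 score += (base[2] + base[1])
--                 base[2] = base[0]
--                 base[1] = 1
--                 base[0] = 0
--             elif hitterresult[inning][case[order]] == 3:
--                 score += base[0] + base[1] + base[2]
--                 base[2] = 1
--                 base[0], base[1] = 0, 0
--             elif hitterresult[inning][case[order]] == 4:
--                 score += base[0] + base[1] + base[2] + 1
--                 base[0], base[1], base[2] = 0, 0, 0
--             order += 1
--             if order == 9:
--                 order = 0
--         inning += 1
--     return score
-- ===== SOURCE B (Python) =====
-- def getans(case, hitterresult, N):
--     # Two-phase per inning: first collect the hit values until three outs,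
--     # then count scorers in one backward suffix-sum pass: a batter whose hit
--     # is worth k bases scores iff k plus the bases of all later hits >= 4.
--     score = 0
--     order = 0
--     for inning in range(N):
--         hits = []
--         outs = 0
--         while outs < 3:
--             k = hitterresult[inning][case[order]]
--             if k == 0:
--                 outs += 1
--             elif 1 <= k <= 4:
--                 hits.append(k)
--             order = (order + 1) % 9
--         suffix = 0
--         for k in reversed(hits):
--             if k + suffix >= 4:
--                 score += 1
--             suffix += k
--     return score
-- ===== Notes on version B (the rewrite author's own statement) =====
-- stated objective: alternative
-- what changed: Replaces A's base-occupancy state machine (three base slots shuffled per hit) by a two-phase per-inning computation: collect the hit values until three outs, then count scorers in a single backward suffix-sum pass, a k-base hit scoring iff k plus the total bases of all later hits in the inning reaches 4; no base state is maintained at all.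
-- outside the precondition, e.g. on getans([0, 0, 0, 99, 0, 0, 0, 0, 0], [[0]], 1): A returns 0, B returns 0
import Mathlib
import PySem

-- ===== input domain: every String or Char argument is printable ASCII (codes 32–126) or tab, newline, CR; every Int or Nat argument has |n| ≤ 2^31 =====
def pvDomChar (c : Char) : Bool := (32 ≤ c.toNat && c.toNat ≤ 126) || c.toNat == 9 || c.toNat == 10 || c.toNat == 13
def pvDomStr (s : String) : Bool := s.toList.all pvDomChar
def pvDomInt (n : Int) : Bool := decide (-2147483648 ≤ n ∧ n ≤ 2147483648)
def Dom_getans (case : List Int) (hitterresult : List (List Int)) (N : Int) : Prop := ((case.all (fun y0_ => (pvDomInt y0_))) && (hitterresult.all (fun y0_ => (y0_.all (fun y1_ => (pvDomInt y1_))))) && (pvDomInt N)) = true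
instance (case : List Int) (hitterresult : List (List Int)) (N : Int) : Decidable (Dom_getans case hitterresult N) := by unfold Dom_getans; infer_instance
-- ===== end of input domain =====

-- B drops A's base-occupancy state machine: each inning it first collects the hit values
-- until three outs, then counts scorers in one backward suffix-sum pass (a k-base hit
-- scores iff k plus the bases of all later hits reaches 4); objective: alternative
-- algorithm, same loop count, no speed claim.
-- Under Pre_ each inning's while loop makes at most 27 plate appearances (every cycle of
-- the 9 batters contains at least one out), so both ports run the inner loop with fuel 27,
-- which never runs out on admitted inputs.

-- ===== PORT A =====
-- inner while loop of A; state: order, outcnt, score, base[0], base[1], base[2]; returns (score, order)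
def pvInnerA (caseL row : List Int) : Nat → Nat → Int → Int → Int → Int → Int → Int × Nat
  | 0, order, _, score, _, _, _ => (score, order)
  | fuel+1, order, outcnt, score, b0, b1, b2 =>
    if 3 ≤ outcnt then (score, order)
    else
      match PySem.List.pyGet? caseL (order : Int) with
      | none => (score, order)      -- Python raises IndexError here (excluded by Pre_)
      | some c =>
        match PySem.List.pyGet? row c with
        | none => (score, order)    -- Python raises IndexError here (excluded by Pre_)
        | some v =>
          let order' := if order + 1 = 9 then 0 else order + 1
          if v = 0 then pvInnerA caseL row fuel order' (outcnt+1) score b0 b1 b2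
          else if v = 1 then pvInnerA caseL row fuel order' outcnt (score + b2) 1 b0 b1
          else if v = 2 then pvInnerA caseL row fuel order' outcnt (score + b2 + b1) 0 1 b0
          else if v = 3 then pvInnerA caseL row fuel order' outcnt (score + b0 + b1 + b2) 0 0 1
          else if v = 4 then pvInnerA caseL row fuel order' outcnt (score + b0 + b1 + b2 + 1) 0 0 0
          else pvInnerA caseL row fuel order' outcnt score b0 b1 b2

-- outer while loop of A over innings
def pvOuterA (caseL : List Int) (hr : List (List Int)) : Nat → Nat → Nat → Int → Int
  | 0, _, _, score => score
  | rem+1, inning, order, score =>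
    let row := (PySem.List.pyGet? hr (inning : Int)).getD []
    let r := pvInnerA caseL row 27 order 0 score 0 0 0
    pvOuterA caseL hr rem (inning+1) r.2 r.1

def getans (case : List Int) (hitterresult : List (List Int)) (N : Int) : Int :=
  pvOuterA case hitterresult N.toNat 0 0 0

-- ===== PORT B =====
-- phase 1: the collecting while loop of B; returns (hits, order)
def pvCollect (caseL row : List Int) : Nat → Nat → Int → List Int × Nat
  | 0, order, _ => ([], order)
  | fuel+1, order, outs =>
    if 3 ≤ outs then ([], order)
    else
      match PySem.List.pyGet? caseL (order : Int) with
      | none => ([], order)         -- Python raises IndexError here (excluded by Pre_)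
      | some c =>
        match PySem.List.pyGet? row c with
        | none => ([], order)       -- Python raises IndexError here (excluded by Pre_)
        | some k =>
          let order' := (order + 1) % 9
          if k = 0 then pvCollect caseL row fuel order' (outs+1)
          else if 1 ≤ k ∧ k ≤ 4 then
            let r := pvCollect caseL row fuel order' outs
            (k :: r.1, r.2)
          else pvCollect caseL row fuel order' outs

-- phase 2 of B: the backward pass 'for k in reversed(hits)' with state (score, suffix)
def pvBackPass (hits : List Int) (score : Int) : Int × Int :=
  hits.reverse.foldl (fun (p : Int × Int) k => (if 4 ≤ k + p.2 then p.1 + 1 else p.1, p.2 + k)) (score, 0)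

-- the for-loop over innings of B
def pvOuterB (caseL : List Int) (hr : List (List Int)) : Nat → Nat → Nat → Int → Int
  | 0, _, _, score => score
  | rem+1, inning, order, score =>
    let row := (PySem.List.pyGet? hr (inning : Int)).getD []
    let r := pvCollect caseL row 27 order 0
    pvOuterB caseL hr rem (inning+1) r.2 (pvBackPass r.1 score).1

def getans_alt (case : List Int) (hitterresult : List (List Int)) (N : Int) : Int :=
  pvOuterB case hitterresult N.toNat 0 0 0

-- ===== PRECONDITION & SPEC =====
-- Pre_ excludes exactly the inputs on which the Python A raises IndexError (an inning or
-- batter index outside its list) or never terminates (a played inning whose nine batters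
-- contain no out).  It asks that all nine batters of every played inning be validly
-- indexable, slightly stronger than A's lazy evaluation: A can return before reaching an
-- invalid batter index (see cites in claim.json).
def Pre_getans (case : List Int) (hitterresult : List (List Int)) (N : Int) : Prop :=
  (0 < N → 9 ≤ case.length ∧ N ≤ hitterresult.length) ∧
  ∀ inning ∈ List.range N.toNat,
    (∀ i ∈ List.range 9,
        (PySem.List.pyGet? (hitterresult.getD inning []) (case.getD i 0)).isSome) ∧
    (∃ i ∈ List.range 9,
        PySem.List.pyGet? (hitterresult.getD inning []) (case.getD i 0) = some 0)
instance (case : List Int) (hitterresult : List (List Int)) (N : Int) : Decidable (Pre_getans case hitterresult N) := by unfold Pre_getans; infer_instance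

def pvWitness_getans : List Int × List (List Int) × Int :=
  ([0, 1, 2, 3, 4, 5, 6, 7, 8], [[1, 4, 0, 0, 2, 0, 3, 1, 0]], 1)

def Spec_getans (case : List Int) (hitterresult : List (List Int)) (N : Int) (out : Int) : Prop := out = getans_alt case hitterresult N
instance (case : List Int) (hitterresult : List (List Int)) (N : Int) (out : Int) : Decidable (Spec_getans case hitterresult N out) := by unfold Spec_getans; infer_instance

-- ===== CLAIM (what is proved, stated in full; the proofs are below) =====
def Claim_equal_getans : Prop := ∀ (case : List Int) (hitterresult : List (List Int)) (N : Int), Dom_getans case hitterresult N → Pre_getans case hitterresult N → Spec_getans case hitterresult N (getans case hitterresult N)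

-- ===== LEMMAS AND PROOFS =====

-- number of scorers among the collected hits: a k-base hit scores iff k + later bases ≥ 4
def pvCnt : List Int → Int
  | [] => 0
  | k :: t => (if 4 ≤ k + t.sum then 1 else 0) + pvCnt t

-- the backward pass computes score + pvCnt and the total bases
theorem pvBackPass_eq (hits : List Int) (score : Int) :
    pvBackPass hits score = (score + pvCnt hits, hits.sum) := by
  induction hits generalizing score with
  | nil => simp [pvBackPass, pvCnt]
  | cons k t ih =>
    have h := ih score
    simp only [pvBackPass] at h ⊢
    rw [List.reverse_cons, List.foldl_append, h]
    simp only [List.foldl_cons, List.foldl_nil, pvCnt, List.sum_cons]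
    split_ifs <;> simp only [Prod.mk.injEq] <;> constructor <;> omega

-- every collected hit is at least 1, so the collected total bases are nonnegative
theorem pvCollect_sum_nonneg (caseL row : List Int) (fuel : Nat) :
    ∀ (order : Nat) (outs : Int), 0 ≤ (pvCollect caseL row fuel order outs).1.sum := by
  induction fuel with
  | zero => intro _ _; simp [pvCollect]
  | succ fuel ih =>
    intro order outs
    rw [pvCollect]
    by_cases hout : 3 ≤ outs
    · simp [hout]
    · simp only [hout, if_false]
      cases hc : PySem.List.pyGet? caseL (order : Int) with
      | none => simp
      | some c =>
        cases hv : PySem.List.pyGet? row c with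
        | none => simp [hv]
        | some k =>
          simp only [hv]
          have h1 := ih ((order + 1) % 9) (outs + 1)
          have h2 := ih ((order + 1) % 9) outs
          split_ifs with hk hin
          · exact h1
          · simp only [List.sum_cons]; omega
          · exact h2

-- pending score of the runners already on base, given the remaining hits
def pvP (b0 b1 b2 : Int) (hits : List Int) : Int :=
  b0 * (if 3 ≤ hits.sum then 1 else 0) +
  b1 * (if 2 ≤ hits.sum then 1 else 0) +
  b2 * (if 1 ≤ hits.sum then 1 else 0)

-- A's state-machine inner loop = score + scorers among collected hits + pending runners
theorem pvInner_eq (caseL row : List Int) (fuel : Nat) :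
    ∀ (order : Nat) (outcnt score b0 b1 b2 : Int), order < 9 →
      pvInnerA caseL row fuel order outcnt score b0 b1 b2 =
        (score + pvCnt (pvCollect caseL row fuel order outcnt).1
           + pvP b0 b1 b2 (pvCollect caseL row fuel order outcnt).1,
         (pvCollect caseL row fuel order outcnt).2) := by
  induction fuel with
  | zero =>
    intro order outcnt score b0 b1 b2 _
    simp [pvInnerA, pvCollect, pvCnt, pvP]
  | succ fuel ih =>
    intro order outcnt score b0 b1 b2 ho
    rw [pvInnerA, pvCollect]
    by_cases hout : 3 ≤ outcnt
    · simp [hout, pvCnt, pvP]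
    · simp only [hout, if_false]
      cases hc : PySem.List.pyGet? caseL (order : Int) with
      | none => simp [pvCnt, pvP]
      | some c =>
        cases hv : PySem.List.pyGet? row c with
        | none => simp [hv, pvCnt, pvP]
        | some v =>
          simp only [hv]
          have hord : ((if order + 1 = 9 then 0 else order + 1) : Nat) = (order + 1) % 9 := by
            split_ifs <;> omega
          have ho' : (order + 1) % 9 < 9 := Nat.mod_lt _ (by omega)
          simp only [hord]
          by_cases hv0 : v = 0
          · subst hv0; simp only [if_pos]
            exact ih _ _ _ _ _ _ ho'
          · have hv0' : ¬ (v = 0) := hv0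
            by_cases hhit : v = 1 ∨ v = 2 ∨ v = 3 ∨ v = 4
            · rcases hhit with rfl|rfl|rfl|rfl <;>
              · norm_num
                rw [ih _ _ _ _ _ _ ho']
                simp only [pvCnt, pvP, List.sum_cons, Prod.mk.injEq, mul_ite, mul_one, mul_zero]
                refine ⟨?_, trivial⟩
                have hs := pvCollect_sum_nonneg caseL row fuel ((order + 1) % 9) outcnt
                split_ifs <;> omega
            · have hnin : ¬ (1 ≤ v ∧ v ≤ 4) := by omega
              have h1 : ¬ (v = 1) := by omega
              have h2 : ¬ (v = 2) := by omega
              have h3 : ¬ (v = 3) := by omega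
              have h4 : ¬ (v = 4) := by omega
              simp only [hv0', h1, h2, h3, h4, hnin, if_false]
              exact ih _ _ _ _ _ _ ho'
-- the collecting loop keeps order below 9
theorem pvCollect_lt (caseL row : List Int) (fuel : Nat) :
    ∀ (order : Nat) (outs : Int), order < 9 →
      (pvCollect caseL row fuel order outs).2 < 9 := by
  induction fuel with
  | zero => intro order outs ho; exact ho
  | succ fuel ih =>
    intro order outs ho
    rw [pvCollect]
    by_cases hout : 3 ≤ outs
    · simpa [hout] using ho
    · simp only [hout, if_false]
      cases hc : PySem.List.pyGet? caseL (order : Int) with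
      | none => exact ho
      | some c =>
        cases hv : PySem.List.pyGet? row c with
        | none => simpa [hv] using ho
        | some k =>
          have ho' : (order + 1) % 9 < 9 := Nat.mod_lt _ (by omega)
          simp only [hv]
          split_ifs <;> exact ih _ _ ho'

-- the outer loops agree
theorem pvOuter_eq (caseL : List Int) (hr : List (List Int)) (rem : Nat) :
    ∀ (inning order : Nat) (score : Int), order < 9 →
      pvOuterA caseL hr rem inning order score = pvOuterB caseL hr rem inning order score := by
  induction rem with
  | zero => intro _ _ _ _; rfl
  | succ rem ih =>
    intro inning order score ho
    rw [pvOuterA, pvOuterB]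
    rw [pvInner_eq caseL _ 27 order 0 score 0 0 0 ho]
    rw [pvBackPass_eq]
    simp only [pvP, zero_mul, add_zero]
    exact ih _ _ _ (pvCollect_lt caseL _ 27 order 0 ho)

-- ===== VERDICT (by name: the statement is the Claim_ definition above) =====
theorem getans_spec : Claim_equal_getans := by
  intro case hr N _ _
  unfold Spec_getans getans getans_alt
  exact pvOuter_eq case hr N.toNat 0 0 0 (by omega)
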